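-- pv_equiv track=rewrite | github.com/Laserwort/mastermind-variant | theorycrafting.py | permutations_broken
-- ===== SOURCE A (Python) =====
-- def listtoint(li):
--     n = len(li)
--     digit = 10 ** (n-1)
--     intret = 0
--     for i in li:
--         intret += digit * i
--         digit //= 10
--     return intret
--
-- def push(la,li,a,b): #carries element a of li to element j of li (if a < b otherwise its unaffected)
--     for i in range(a,b-1):
--         la.append(listtoint(li))
--         li[i],li[i+1] = li[i+1],li[i]
--
-- def permutations_broken(li):
--     n = len(li)
--     lisret = []
--     for i in range(n):
--         if i == 0:
--             for j in range(n-1):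
--                 push(lisret,li,1,n)
--         else:
--             li[0],li[i] = li[i],li[0]
--             for j in range(n-1):
--                 push(lisret,li,1,n)
--     return (lisret,len(lisret))
-- ===== SOURCE B (Python) =====
-- def permutations_broken(li):
--     # Same swap sequence as the original, but the integer value of the list is
--     # maintained incrementally per adjacent swap instead of being recomputed.
--     # Mutates li in place exactly like the original.
--     n = len(li)
--     pw = [10 ** (n - 1 - k) for k in range(n)]
--     val = 0
--     for k in range(n):
--         val += li[k] * pw[k]
--     out = []
--     for i in range(n):
--         if i > 0:
--             a, b = li[0], li[i]
--             val += (b - a) * (pw[0] - pw[i])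
--             li[0], li[i] = b, a
--         for _ in range(n - 1):
--             for k in range(1, n - 1):
--                 out.append(val)
--                 a, b = li[k], li[k + 1]
--                 val += (b - a) * (pw[k] - pw[k + 1])
--                 li[k], li[k + 1] = b, a
--     return (out, len(out))
-- ===== Notes on version B (the rewrite author's own statement) =====
-- stated objective: faster
-- what changed: B performs the same swap schedule but maintains the list's integer encoding as a running value updated in O(1) big-int ops per adjacent swap (using precomputed powers of ten), instead of recomputing listtoint over the whole list before every append.
import Mathlib
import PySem

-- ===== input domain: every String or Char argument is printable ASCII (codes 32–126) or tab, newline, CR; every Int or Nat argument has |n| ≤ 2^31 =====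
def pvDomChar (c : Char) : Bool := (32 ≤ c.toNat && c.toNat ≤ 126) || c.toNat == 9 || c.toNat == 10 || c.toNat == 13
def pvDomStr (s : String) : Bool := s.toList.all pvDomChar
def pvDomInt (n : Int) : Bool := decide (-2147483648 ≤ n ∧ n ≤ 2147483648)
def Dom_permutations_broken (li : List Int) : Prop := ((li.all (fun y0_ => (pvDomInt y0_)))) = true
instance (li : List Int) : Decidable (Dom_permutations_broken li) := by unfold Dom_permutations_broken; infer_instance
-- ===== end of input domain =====

-- B maintains the listtoint value of the working list incrementally across each
-- adjacent swap instead of recomputing it per append (asymptotically faster, as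
-- measured). Both A and B mutate the Python argument in place identically; the
-- equivalence proved here is about the return value.


-- ===== PORT A =====
-- li[i],li[j] = li[j],li[i]; every call site has i, j in range, so the getD default is never read
def pvSwap (li : List Int) (i j : Nat) : List Int :=
  (li.set i (li.getD j 0)).set j (li.getD i 0)

-- listtoint: running digit = 10**(n-1), halved by //10 each step.  For the empty list
-- Python's digit is the float 0.1, but the loop body never runs, so the returned 0 matches.
def pvListtoint (li : List Int) : Int :=
  let n := li.length
  let digit : Int := (10 : Int) ^ (n - 1)
  (li.foldl (fun (s : Int × Int) i => (s.1 + s.2 * i, PySem.Int.floordiv s.2 10)) (0, digit)).1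

-- body of push's loop: la.append(listtoint(li)); swap li[i], li[i+1]
def pvAInner (s : List Int × List Int) (i : Int) : List Int × List Int :=
  (s.1 ++ [pvListtoint s.2], pvSwap s.2 i.toNat (i.toNat + 1))

def pvPush (la li : List Int) (a b : Int) : List Int × List Int :=
  (PySem.List.pyRange a (b - 1) 1).foldl pvAInner (la, li)

-- for j in range(n-1): push(lisret, li, 1, n)
def pvARound (n : Nat) (s : List Int × List Int) : List Int × List Int :=
  (List.range (n - 1)).foldl (fun t _ => pvPush t.1 t.2 1 (n : Int)) s

-- one iteration of the outer loop of A
def pvAOuter (n : Nat) (s : List Int × List Int) (i : Nat) : List Int × List Int :=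
  if i = 0 then pvARound n s
  else pvARound n (s.1, pvSwap s.2 0 i)

def permutations_broken (li : List Int) : List Int × Int :=
  let n := li.length
  let s := (List.range n).foldl (pvAOuter n) ([], li)
  (s.1, (s.1.length : Int))

-- ===== PORT B =====
-- innermost step of B: append the maintained value, then swap and update it incrementally
def pvBStep (pw : List Int) (t : List Int × List Int × Int) (kk : Int) : List Int × List Int × Int :=
  let k := kk.toNat
  let a := t.2.1.getD k 0
  let b := t.2.1.getD (k + 1) 0
  (t.1 ++ [t.2.2], pvSwap t.2.1 k (k + 1), t.2.2 + (b - a) * (pw.getD k 0 - pw.getD (k + 1) 0))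

-- for _ in range(n-1): for k in range(1, n-1): …
def pvBRound (n : Nat) (pw : List Int) (t : List Int × List Int × Int) : List Int × List Int × Int :=
  (List.range (n - 1)).foldl
    (fun u _ => (PySem.List.pyRange 1 ((n : Int) - 1) 1).foldl (pvBStep pw) u) t

-- one iteration of the outer loop of B (the i > 0 swap also updates the value)
def pvBOuter (n : Nat) (pw : List Int) (t : List Int × List Int × Int) (i : Nat) :
    List Int × List Int × Int :=
  if 0 < i then
    pvBRound n pw
      (t.1, pvSwap t.2.1 0 i,
        t.2.2 + (t.2.1.getD i 0 - t.2.1.getD 0 0) * (pw.getD 0 0 - pw.getD i 0))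
  else pvBRound n pw t

def permutations_broken_alt (li : List Int) : List Int × Int :=
  let n := li.length
  let pw := (List.range n).map (fun k => (10 : Int) ^ (n - 1 - k))
  let val0 := (List.range n).foldl (fun v k => v + li.getD k 0 * pw.getD k 0) 0
  let s := (List.range n).foldl (pvBOuter n pw) ([], li, val0)
  (s.1, (s.1.length : Int))

-- ===== PRECONDITION & SPEC =====
def Spec_permutations_broken (li : List Int) (out : List Int × Int) : Prop := out = permutations_broken_alt li
instance (li : List Int) (out : List Int × Int) : Decidable (Spec_permutations_broken li out) := by unfold Spec_permutations_broken; infer_instance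

-- ===== CLAIM (what is proved, stated in full; the proofs are below) =====
def Claim_equal_permutations_broken : Prop := ∀ (li : List Int), Dom_permutations_broken li → Spec_permutations_broken li (permutations_broken li)

-- ===== LEMMAS AND PROOFS =====

-- the place value weighting of position k in a list of length n
def pvSum (n : Nat) (li : List Int) : Int :=
  ∑ k ∈ Finset.range n, li.getD k 0 * (10 : Int) ^ (n - 1 - k)

theorem pvListtoint_aux (li : List Int) : ∀ (r : Int) (m : Nat), li.length ≤ m + 1 →
    (li.foldl (fun (s : Int × Int) i => (s.1 + s.2 * i, PySem.Int.floordiv s.2 10))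
        (r, (10 : Int) ^ m)).1
      = r + ∑ k ∈ Finset.range li.length, li.getD k 0 * (10 : Int) ^ (m - k) := by
  induction li with
  | nil => simp
  | cons x xs ih =>
    intro r m h
    simp only [List.foldl_cons]
    cases xs with
    | nil => simp; ring
    | cons y ys =>
      have hm : 1 ≤ m := by simp at h; omega
      have hfd : PySem.Int.floordiv ((10:Int) ^ m) 10 = (10:Int) ^ (m - 1) := by
        rw [PySem.Int.floordiv_eq_ediv_of_pos (by norm_num)]
        have : (10:Int) ^ m = (10:Int) ^ (m-1) * 10 := by
          rw [← pow_succ]; congr 1; omega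
        rw [this, Int.mul_ediv_cancel _ (by norm_num)]
      rw [hfd, ih (r + (10:Int)^m * x) (m-1) (by simp at h ⊢; omega)]
      conv_rhs => rw [List.length_cons, Finset.sum_range_succ']
      have he : ∀ k : Nat, (x :: y :: ys).getD (k+1) 0 * (10:Int) ^ (m - (k+1))
          = (y :: ys).getD k 0 * (10:Int) ^ (m - 1 - k) := fun k => by
        rw [List.getD_cons_succ]; congr 2; omega
      rw [Finset.sum_congr rfl (fun k _ => he k)]
      simp only [List.getD_cons_zero, Nat.sub_zero]
      ring

theorem pvListtoint_eq (li : List Int) : pvListtoint li = pvSum li.length li := by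
  cases li with
  | nil => simp [pvListtoint, pvSum]
  | cons x xs =>
    simpa [pvListtoint, pvSum] using
      pvListtoint_aux (x :: xs) 0 ((x :: xs).length - 1) (by simp)

theorem pvGetD_set (li : List Int) (j k : Nat) (v : Int) (hj : j < li.length) :
    (li.set j v).getD k 0 = if k = j then v else li.getD k 0 := by
  simp only [List.getD, List.getElem?_set, hj, if_true]
  by_cases h : j = k
  · subst h; simp
  · simp [h, Ne.symm h]

theorem pvSum_set (n : Nat) (li : List Int) (j : Nat) (v : Int)
    (hj : j < li.length) (hjn : j < n) :
    pvSum n (li.set j v) = pvSum n li + (v - li.getD j 0) * (10 : Int) ^ (n - 1 - j) := by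
  unfold pvSum
  have step : ∀ k ∈ Finset.range n,
      (li.set j v).getD k 0 * (10:Int) ^ (n-1-k)
        = li.getD k 0 * (10:Int) ^ (n-1-k)
          + (if k = j then (v - li.getD j 0) * (10:Int) ^ (n-1-j) else 0) := by
    intro k _
    rw [pvGetD_set li j k v hj]
    by_cases h : k = j
    · subst h; simp; ring
    · simp [h]
  rw [Finset.sum_congr rfl step, Finset.sum_add_distrib,
    Finset.sum_ite_eq' (Finset.range n) j]
  simp [Finset.mem_range.mpr hjn]

theorem pvSum_swap (n : Nat) (li : List Int) (i j : Nat)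
    (hij : i < j) (hj : j < n) (hn : li.length = n) :
    pvSum n (pvSwap li i j)
      = pvSum n li + (li.getD j 0 - li.getD i 0)
          * ((10 : Int) ^ (n - 1 - i) - (10 : Int) ^ (n - 1 - j)) := by
  have hi : i < li.length := by omega
  have hj' : j < li.length := by omega
  unfold pvSwap
  rw [pvSum_set n _ j _ (by simp; omega) hj,
    pvSum_set n li i _ hi (by omega),
    pvGetD_set li i j _ hi]
  simp only [if_neg (by omega : ¬ j = i)]
  ring

theorem pvSwap_length (li : List Int) (i j : Nat) :
    (pvSwap li i j).length = li.length := by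
  simp [pvSwap]

theorem pvAInner_foldl_length (r : List Int) : ∀ (la li : List Int),
    ((r.foldl pvAInner (la, li)).2).length = li.length := by
  induction r with
  | nil => intro la li; rfl
  | cons x r ih =>
    intro la li
    simp only [List.foldl_cons]
    rw [ih]
    simp [pvAInner, pvSwap]

theorem pvPush_length (n : Nat) (la li : List Int) :
    (pvPush la li 1 (n : Int)).2.length = li.length :=
  pvAInner_foldl_length _ la li

theorem pvARound_length (n : Nat) (s : List Int × List Int) :
    (pvARound n s).2.length = s.2.length := by
  unfold pvARound
  generalize (List.range (n - 1)) = r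
  induction r generalizing s with
  | nil => rfl
  | cons x r ih =>
    simp only [List.foldl_cons]
    rw [ih]
    exact pvPush_length n s.1 s.2

theorem pvFold_eq (n : Nat) : ∀ (r : List Int), (∀ x ∈ r, 0 ≤ x ∧ x.toNat + 1 < n) →
    ∀ (la li : List Int), li.length = n →
    r.foldl (pvBStep ((List.range n).map (fun k => (10 : Int) ^ (n - 1 - k)))) (la, li, pvSum n li)
      = ((r.foldl pvAInner (la, li)).1, (r.foldl pvAInner (la, li)).2,
          pvSum n (r.foldl pvAInner (la, li)).2) := by
  intro r
  induction r with
  | nil => intro _ la li _; rfl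
  | cons x r ih =>
    intro hb la li hlen
    obtain ⟨hx0, hxn⟩ := hb x (List.mem_cons_self ..)
    have hk : x.toNat < n := by omega
    simp only [List.foldl_cons]
    have hstep : pvBStep ((List.range n).map (fun k => (10 : Int) ^ (n - 1 - k)))
          (la, li, pvSum n li) x
        = (la ++ [pvListtoint li], pvSwap li x.toNat (x.toNat + 1),
            pvSum n (pvSwap li x.toNat (x.toNat + 1))) := by
      simp only [pvBStep]
      rw [PySem.List.getD_map_range _ n x.toNat 0 hk,
        PySem.List.getD_map_range _ n (x.toNat + 1) 0 hxn,
        ← pvSum_swap n li x.toNat (x.toNat + 1) (by omega) hxn hlen,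
        pvListtoint_eq, hlen]
    rw [hstep]
    have : pvAInner (la, li) x = (la ++ [pvListtoint li], pvSwap li x.toNat (x.toNat + 1)) := rfl
    rw [this]
    exact ih (fun y hy => hb y (List.mem_cons_of_mem _ hy)) _ _
      (by rw [pvSwap_length]; exact hlen)

theorem pvPush_eq (n : Nat) (la li : List Int) (h : li.length = n) :
    (PySem.List.pyRange 1 ((n : Int) - 1) 1).foldl
        (pvBStep ((List.range n).map (fun k => (10 : Int) ^ (n - 1 - k)))) (la, li, pvSum n li)
      = ((pvPush la li 1 (n : Int)).1, (pvPush la li 1 (n : Int)).2,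
          pvSum n (pvPush la li 1 (n : Int)).2) := by
  unfold pvPush
  exact pvFold_eq n _ (fun x hx => by
    have := PySem.List.mem_pyRange_one.mp hx
    constructor <;> omega) la li h

theorem pvBRound_eq (n : Nat) (la li : List Int) (h : li.length = n) :
    pvBRound n ((List.range n).map (fun k => (10 : Int) ^ (n - 1 - k))) (la, li, pvSum n li)
      = ((pvARound n (la, li)).1, (pvARound n (la, li)).2, pvSum n (pvARound n (la, li)).2) := by
  unfold pvBRound pvARound
  generalize (List.range (n - 1)) = r
  induction r generalizing la li with
  | nil => rfl
  | cons x r ih =>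
    simp only [List.foldl_cons]
    rw [pvPush_eq n la li h]
    exact ih _ _ (by rw [pvPush_length]; exact h)

theorem pvOuter_eq (n : Nat) (r : List Nat) (hmem : ∀ i ∈ r, i < n) :
    ∀ (la li : List Int), li.length = n →
    r.foldl (pvBOuter n ((List.range n).map (fun k => (10 : Int) ^ (n - 1 - k)))) (la, li, pvSum n li)
      = ((r.foldl (pvAOuter n) (la, li)).1, (r.foldl (pvAOuter n) (la, li)).2,
          pvSum n (r.foldl (pvAOuter n) (la, li)).2) := by
  induction r with
  | nil => intro la li _; rfl
  | cons x r ih =>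
    intro la li hlen
    have hx : x < n := hmem x (List.mem_cons_self ..)
    simp only [List.foldl_cons]
    have hstep : pvBOuter n ((List.range n).map (fun k => (10 : Int) ^ (n - 1 - k)))
          (la, li, pvSum n li) x
        = ((pvAOuter n (la, li) x).1, (pvAOuter n (la, li) x).2,
            pvSum n (pvAOuter n (la, li) x).2) := by
      unfold pvBOuter pvAOuter
      by_cases h0 : x = 0
      · subst h0
        rw [if_neg (by simp), if_pos rfl]
        exact pvBRound_eq n la li hlen
      · have hpos : 0 < x := Nat.pos_of_ne_zero h0
        simp only [if_pos hpos, if_neg h0]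
        rw [PySem.List.getD_map_range _ n 0 0 (by omega),
          PySem.List.getD_map_range _ n x 0 hx,
          ← pvSum_swap n li 0 x hpos hx hlen]
        exact pvBRound_eq n la (pvSwap li 0 x) (by rw [pvSwap_length]; exact hlen)
    rw [hstep]
    exact ih (fun y hy => hmem y (List.mem_cons_of_mem _ hy)) _ _
      (by
        unfold pvAOuter
        split <;> rw [pvARound_length] <;> simp [pvSwap_length, hlen])

theorem pvVal0_eq (li : List Int) :
    (List.range li.length).foldl
        (fun v k => v + li.getD k 0 *
          ((List.range li.length).map (fun k => (10 : Int) ^ (li.length - 1 - k))).getD k 0) 0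
      = pvSum li.length li := by
  have h1 : (List.range li.length).foldl
        (fun v k => v + li.getD k 0 *
          ((List.range li.length).map (fun k => (10 : Int) ^ (li.length - 1 - k))).getD k 0) 0
      = (List.range li.length).foldl
          (fun v k => v + li.getD k 0 * (10 : Int) ^ (li.length - 1 - k)) 0 :=
    PySem.List.foldl_congr_mem (List.range li.length) _ _ 0 (fun acc x hx => by
      rw [PySem.List.getD_map_range _ _ x 0 (List.mem_range.mp hx)])
  rw [h1, PySem.List.foldl_add, zero_add]
  rfl

-- ===== VERDICT (by name: the statement is the Claim_ definition above) =====
theorem permutations_broken_spec : Claim_equal_permutations_broken := by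
  intro li _
  show permutations_broken li = permutations_broken_alt li
  simp only [permutations_broken, permutations_broken_alt, pvVal0_eq]
  rw [pvOuter_eq li.length (List.range li.length) (fun i hi => List.mem_range.mp hi) [] li rfl]
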